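-- pv_equiv track=rewrite | github.com/jrhaberstroh/advent-of-code-2019 | day21.py | script_generator
-- ===== SOURCE A (Python) =====
-- def script_generator(terms, depth, array = []):
--     if depth == 1:
--         for t in terms:
--             yield array + [t]
--     else:
--         for t in terms:
--             for script in script_generator(terms, depth - 1, array + [t]):
--                 yield script
-- ===== SOURCE B (Python) =====
-- def script_generator(terms, depth, array=[]):
--     # iterative bottom-up Cartesian product instead of recursion
--     results = [list(array)]
--     for _ in range(depth):
--         results = [r + [t] for r in results for t in terms]
--     yield from results
-- ===== Notes on version B (the rewrite author's own statement) =====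
-- stated objective: idiomatic
-- what changed: Replaced the depth-wise recursion threading an accumulator through nested generators with a single bottom-up loop that extends a list of partial results by every term, depth times.
-- outside the precondition, e.g. on script_generator([], 0, []): A returns [], B returns [[]]; on script_generator([], -2, ['x']): A returns [], B returns [['x']]
import Mathlib
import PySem

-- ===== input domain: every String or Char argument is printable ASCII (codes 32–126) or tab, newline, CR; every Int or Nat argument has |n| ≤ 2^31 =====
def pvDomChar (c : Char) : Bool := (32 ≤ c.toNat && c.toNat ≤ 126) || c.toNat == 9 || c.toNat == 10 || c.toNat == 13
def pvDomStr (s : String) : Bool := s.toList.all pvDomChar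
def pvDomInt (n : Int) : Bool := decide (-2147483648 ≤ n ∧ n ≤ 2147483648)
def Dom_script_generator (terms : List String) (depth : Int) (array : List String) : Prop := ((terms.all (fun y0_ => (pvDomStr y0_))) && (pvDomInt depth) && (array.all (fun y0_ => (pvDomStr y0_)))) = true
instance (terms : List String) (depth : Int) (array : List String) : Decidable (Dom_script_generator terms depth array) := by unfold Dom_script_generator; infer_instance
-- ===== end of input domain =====

-- B replaces A's recursive generator with one bottom-up iteration extending partial rows (idiomatic; return-value equivalence for depth ≥ 1).

-- ===== PORT A =====
-- A recurses on `depth`; the Nat fuel (depth.toNat) only makes the recursion total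
-- where Python diverges (depth ≤ 0 with non-empty terms, outside Pre_): for depth ≥ 1
-- the fuel never runs out and each step mirrors A's branches exactly.
def script_generator_aux (fuel : Nat) (terms : List String) (depth : Int) (array : List String) : List (List String) :=
  match fuel with
  | 0 => []
  | n + 1 =>
    if depth == 1 then
      terms.map (fun t => array ++ [t])
    else
      terms.flatMap (fun t => script_generator_aux n terms (depth - 1) (array ++ [t]))

def script_generator (terms : List String) (depth : Int) (array : List String) : List (List String) :=
  script_generator_aux depth.toNat terms depth array

-- ===== PORT B =====
def script_generator_alt (terms : List String) (depth : Int) (array : List String) : List (List String) :=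
  (List.range depth.toNat).foldl
    (fun results _ => results.flatMap (fun r => terms.map (fun t => r ++ [t])))
    [array]

-- ===== PRECONDITION & SPEC =====
-- Pre_ excludes depth < 1: there A infinite-recurses for non-empty terms (RecursionError)
-- and yields nothing for empty terms, while B's product formulation yields the single row `array`.
def Pre_script_generator (terms : List String) (depth : Int) (array : List String) : Prop := 1 ≤ depth
instance (terms : List String) (depth : Int) (array : List String) : Decidable (Pre_script_generator terms depth array) := by unfold Pre_script_generator; infer_instance

def pvWitness_script_generator : List String × Int × List String := (["A", "B"], 2, ["N"])

def Spec_script_generator (terms : List String) (depth : Int) (array : List String) (out : List (List String)) : Prop := out = script_generator_alt terms depth array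
instance (terms : List String) (depth : Int) (array : List String) (out : List (List String)) : Decidable (Spec_script_generator terms depth array out) := by unfold Spec_script_generator; infer_instance

-- ===== CLAIM (what is proved, stated in full; the proofs are below) =====
def Claim_equal_script_generator : Prop := ∀ (terms : List String) (depth : Int) (array : List String), Dom_script_generator terms depth array → Pre_script_generator terms depth array → Spec_script_generator terms depth array (script_generator terms depth array)

-- ===== LEMMAS AND PROOFS =====

-- one bottom-up step of B
def pvStep (terms : List String) (results : List (List String)) : List (List String) :=
  results.flatMap (fun r => terms.map (fun t => r ++ [t]))

theorem pvStep_append (terms : List String) (a b : List (List String)) :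
    pvStep terms (a ++ b) = pvStep terms a ++ pvStep terms b := by
  simp [pvStep]

theorem pvStep_iterate_append (terms : List String) (k : Nat) (a b : List (List String)) :
    (pvStep terms)^[k] (a ++ b) = (pvStep terms)^[k] a ++ (pvStep terms)^[k] b := by
  induction k generalizing a b with
  | zero => simp
  | succ n ih => simp [Function.iterate_succ_apply, pvStep_append, ih]

theorem pvStep_iterate_nil (terms : List String) (k : Nat) :
    (pvStep terms)^[k] [] = [] := by
  induction k with
  | zero => simp
  | succ n ih => simp [Function.iterate_succ_apply, pvStep, ih]

theorem pvStep_iterate_map (terms : List String) (k : Nat) (ts : List String)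
    (f : String → List String) :
    (pvStep terms)^[k] (ts.map f) = ts.flatMap (fun t => (pvStep terms)^[k] [f t]) := by
  induction ts with
  | nil => simp [pvStep_iterate_nil]
  | cons x xs ih =>
    have : (x :: xs).map f = [f x] ++ xs.map f := by simp
    rw [this, pvStep_iterate_append, ih]
    simp

theorem pvAux_iterate (terms : List String) (n : Nat) (array : List String) :
    script_generator_aux (n + 1) terms ((n : Int) + 1) array
      = (pvStep terms)^[n + 1] [array] := by
  induction n generalizing array with
  | zero =>
    simp [script_generator_aux, pvStep]
  | succ m ih =>
    have hne : (((m + 1 : Nat) : Int) + 1 == 1) = false := by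
      simp
      omega
    rw [script_generator_aux, hne]
    simp only [Bool.false_eq_true, if_false]
    have harg : ((m + 1 : Nat) : Int) + 1 - 1 = ((m : Nat) : Int) + 1 := by push_cast; ring
    rw [harg]
    have hstep : (pvStep terms)^[m + 1 + 1] [array]
        = (pvStep terms)^[m + 1] (pvStep terms [array]) := by
      rw [Function.iterate_succ_apply]
    rw [hstep]
    have h1 : pvStep terms [array] = terms.map (fun t => array ++ [t]) := by simp [pvStep]
    rw [h1, pvStep_iterate_map]
    refine List.flatMap_congr ?_
    intro t _
    exact ih (array ++ [t])

theorem pvFoldl_range_iterate {α : Type} (f : α → α) (n : Nat) (init : α) :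
    (List.range n).foldl (fun a _ => f a) init = f^[n] init := by
  induction n generalizing init with
  | zero => simp
  | succ m ih =>
    rw [List.range_succ, List.foldl_append]
    simp [ih, Function.iterate_succ_apply']

-- ===== VERDICT (by name: the statement is the Claim_ definition above) =====
theorem script_generator_spec : Claim_equal_script_generator := by
  intro terms depth array _ hpre
  unfold Spec_script_generator script_generator script_generator_alt Pre_script_generator at *
  obtain ⟨n, hn⟩ : ∃ n : Nat, depth = (n : Int) + 1 := ⟨(depth - 1).toNat, by omega⟩
  subst hn
  have htn : ((n : Int) + 1).toNat = n + 1 := by omega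
  rw [htn, pvAux_iterate]
  exact (pvFoldl_range_iterate (pvStep terms) (n + 1) [array]).symm
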